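-- pv_equiv track=rewrite | github.com/dbqls9713/valuation | data/gold/validation/ttm.py | _get_prior_quarters
-- ===== SOURCE A (Python) =====
-- def _get_prior_quarters(fy: int, fq: str) -> list[tuple[int, str]]:
--   """Get the 4 quarters ending at (fy, fq)."""
--   quarters = ['Q1', 'Q2', 'Q3', 'Q4']
--   q_idx = quarters.index(fq)
--
--   result = []
--   for i in range(4):
--     offset = q_idx - i
--     if offset >= 0:
--       result.append((fy, quarters[offset]))
--     else:
--       result.append((fy - 1, quarters[4 + offset]))
--
--   return result
-- ===== SOURCE B (Python) =====
-- def _get_prior_quarters(fy: int, fq: str) -> list[tuple[int, str]]: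
--   """Get the 4 quarters ending at (fy, fq)."""
--   quarters = ['Q1', 'Q2', 'Q3', 'Q4']
--   q_idx = quarters.index(fq)
--   names = quarters[:q_idx + 1][::-1] + quarters[q_idx + 1:][::-1]
--   years = [fy] * (q_idx + 1) + [fy - 1] * (3 - q_idx)
--   return list(zip(years, names))
-- ===== Notes on version B (the rewrite author's own statement) =====
-- stated objective: alternative
-- what changed: B has no per-quarter loop or wrap branch: it builds the whole name sequence at once from two reversed slices of the quarter list (the prefix up to fq reversed, then the suffix reversed) and the year sequence by list repetition ([fy]*(q_idx+1) + [fy-1]*(3-q_idx)), then zips the two; A iterates 4 steps with an if/else year-wrap per step.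
import Mathlib
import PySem

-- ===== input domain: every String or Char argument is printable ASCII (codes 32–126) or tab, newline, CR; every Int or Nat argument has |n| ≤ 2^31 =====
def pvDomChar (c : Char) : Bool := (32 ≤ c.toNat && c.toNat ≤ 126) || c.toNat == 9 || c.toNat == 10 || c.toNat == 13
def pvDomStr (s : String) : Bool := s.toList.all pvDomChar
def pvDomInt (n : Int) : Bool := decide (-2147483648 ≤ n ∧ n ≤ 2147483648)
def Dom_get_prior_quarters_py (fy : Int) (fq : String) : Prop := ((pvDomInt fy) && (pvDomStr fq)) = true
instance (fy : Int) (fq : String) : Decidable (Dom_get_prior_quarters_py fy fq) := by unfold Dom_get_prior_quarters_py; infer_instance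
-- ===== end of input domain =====

-- B replaces A's 4-step loop with per-step wrap branch by slice/reverse/concatenate
-- of the quarter list plus list repetition for the years, zipped together
-- (alternative decomposition; same cost).

-- ===== PORT A =====
-- 'quarters.index(fq)' raises ValueError when fq is not a quarter name: index? = none
-- there, excluded by Pre_; the .getD "" on pyGet? is unreachable (offset always in range).
def get_prior_quarters_py (fy : Int) (fq : String) : List (Int × String) :=
  let quarters : List String := ["Q1", "Q2", "Q3", "Q4"]
  match PySem.List.index? quarters fq with
  | none => []  -- ValueError: outside Pre_
  | some qIdx =>
    (PySem.List.pyRange 0 4 1).foldl (fun result i =>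
      let offset : Int := (qIdx : Int) - i
      if offset ≥ 0 then
        result ++ [(fy, (PySem.List.pyGet? quarters offset).getD "")]
      else
        result ++ [(fy - 1, (PySem.List.pyGet? quarters (4 + offset)).getD "")]) []

-- ===== PORT B =====
def get_prior_quarters_py_alt (fy : Int) (fq : String) : List (Int × String) :=
  let quarters : List String := ["Q1", "Q2", "Q3", "Q4"]
  match PySem.List.index? quarters fq with
  | none => []  -- ValueError: outside Pre_
  | some qIdx =>
    -- quarters[:q_idx+1][::-1] + quarters[q_idx+1:][::-1]
    let names : List String :=
      ((PySem.List.slice? (PySem.List.slice quarters none (some ((qIdx : Int) + 1))) none none (-1)).getD []) ++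
      ((PySem.List.slice? (PySem.List.slice quarters (some ((qIdx : Int) + 1)) none) none none (-1)).getD [])
    -- [fy]*(q_idx+1) + [fy-1]*(3-q_idx)
    let years : List Int := List.replicate (qIdx + 1) fy ++ List.replicate (3 - qIdx) (fy - 1)
    years.zip names

-- ===== PRECONDITION & SPEC =====
-- Pre_ excludes exactly the fq on which A raises ValueError (quarters.index).
def Pre_get_prior_quarters_py (fy : Int) (fq : String) : Prop :=
  fq ∈ (["Q1", "Q2", "Q3", "Q4"] : List String)
instance (fy : Int) (fq : String) : Decidable (Pre_get_prior_quarters_py fy fq) := by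
  unfold Pre_get_prior_quarters_py; infer_instance
def pvWitness_get_prior_quarters_py : Int × String := (2024, "Q2")

def Spec_get_prior_quarters_py (fy : Int) (fq : String) (out : List (Int × String)) : Prop := out = get_prior_quarters_py_alt fy fq
instance (fy : Int) (fq : String) (out : List (Int × String)) : Decidable (Spec_get_prior_quarters_py fy fq out) := by unfold Spec_get_prior_quarters_py; infer_instance

-- ===== CLAIM (what is proved, stated in full; the proofs are below) =====
def Claim_equal_get_prior_quarters_py : Prop := ∀ (fy : Int) (fq : String), Dom_get_prior_quarters_py fy fq → Pre_get_prior_quarters_py fy fq → Spec_get_prior_quarters_py fy fq (get_prior_quarters_py fy fq)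

-- ===== LEMMAS AND PROOFS =====
lemma idx1 : PySem.List.index? (["Q1","Q2","Q3","Q4"] : List String) "Q1" = some 0 := by decide
lemma idx2 : PySem.List.index? (["Q1","Q2","Q3","Q4"] : List String) "Q2" = some 1 := by decide
lemma idx3 : PySem.List.index? (["Q1","Q2","Q3","Q4"] : List String) "Q3" = some 2 := by decide
lemma idx4 : PySem.List.index? (["Q1","Q2","Q3","Q4"] : List String) "Q4" = some 3 := by decide

lemma altQ1 (fy : Int) : get_prior_quarters_py_alt fy "Q1" = [(fy, "Q1"), (fy - 1, "Q4"), (fy - 1, "Q3"), (fy - 1, "Q2")] := by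
  simp only [get_prior_quarters_py_alt, idx1]
  rfl
lemma altQ2 (fy : Int) : get_prior_quarters_py_alt fy "Q2" = [(fy, "Q2"), (fy, "Q1"), (fy - 1, "Q4"), (fy - 1, "Q3")] := by
  simp only [get_prior_quarters_py_alt, idx2]
  rfl
lemma altQ3 (fy : Int) : get_prior_quarters_py_alt fy "Q3" = [(fy, "Q3"), (fy, "Q2"), (fy, "Q1"), (fy - 1, "Q4")] := by
  simp only [get_prior_quarters_py_alt, idx3]
  rfl
lemma altQ4 (fy : Int) : get_prior_quarters_py_alt fy "Q4" = [(fy, "Q4"), (fy, "Q3"), (fy, "Q2"), (fy, "Q1")] := by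
  simp only [get_prior_quarters_py_alt, idx4]
  rfl

lemma aQ1 (fy : Int) : get_prior_quarters_py fy "Q1" = [(fy, "Q1"), (fy - 1, "Q4"), (fy - 1, "Q3"), (fy - 1, "Q2")] := by
  simp only [get_prior_quarters_py, idx1]
  norm_num [PySem.List.pyRange, PySem.List.pyGet?, PySem.List.pyIdx?,
            show Int.toNat 4 = 4 from rfl, List.range_succ]
  and_intros <;> decide
lemma aQ2 (fy : Int) : get_prior_quarters_py fy "Q2" = [(fy, "Q2"), (fy, "Q1"), (fy - 1, "Q4"), (fy - 1, "Q3")] := by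
  simp only [get_prior_quarters_py, idx2]
  norm_num [PySem.List.pyRange, PySem.List.pyGet?, PySem.List.pyIdx?,
            show Int.toNat 4 = 4 from rfl, List.range_succ]
  and_intros <;> decide
lemma aQ3 (fy : Int) : get_prior_quarters_py fy "Q3" = [(fy, "Q3"), (fy, "Q2"), (fy, "Q1"), (fy - 1, "Q4")] := by
  simp only [get_prior_quarters_py, idx3]
  norm_num [PySem.List.pyRange, PySem.List.pyGet?, PySem.List.pyIdx?,
            show Int.toNat 4 = 4 from rfl, List.range_succ]
  and_intros <;> decide
lemma aQ4 (fy : Int) : get_prior_quarters_py fy "Q4" = [(fy, "Q4"), (fy, "Q3"), (fy, "Q2"), (fy, "Q1")] := by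
  simp only [get_prior_quarters_py, idx4]
  norm_num [PySem.List.pyRange, PySem.List.pyGet?, PySem.List.pyIdx?,
            show Int.toNat 4 = 4 from rfl, List.range_succ]
  and_intros <;> decide

-- ===== VERDICT (by name: the statement is the Claim_ definition above) =====
theorem get_prior_quarters_py_spec : Claim_equal_get_prior_quarters_py := by
  intro fy fq _ hpre
  unfold Spec_get_prior_quarters_py
  unfold Pre_get_prior_quarters_py at hpre
  fin_cases hpre
  · rw [aQ1, altQ1]
  · rw [aQ2, altQ2]
  · rw [aQ3, altQ3]
  · rw [aQ4, altQ4]
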